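-- pv_equiv track=rewrite | github.com/zhyale/SDL-SaaS | usermgmt/utils.py | is_free_email
-- ===== SOURCE A (Python) =====
-- def is_free_email(email):
--     company_domain=email[email.index('@')+1:]
--     block_email_domains=["qq.","163.","126.","sina.","hotmail.", "gmail.","yahoo.", "sohu.","outlook.","foxmail."]
--     for block_domain in block_email_domains:
--         try:
--             if company_domain.index(block_domain)==0:
--                 return True
--         except:
--             pass
--     return False
-- ===== SOURCE B (Python) =====
-- FREE_PROVIDERS = {'qq', '163', '126', 'sina', 'hotmail', 'gmail',
--                   'yahoo', 'sohu', 'outlook', 'foxmail'}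
--
-- def is_free_email(email):
--     company_domain = email[email.index('@')+1:]
--     head, sep, _tail = company_domain.partition('.')
--     return sep == '.' and head in FREE_PROVIDERS
-- ===== Notes on version B (the rewrite author's own statement) =====
-- stated objective: idiomatic
-- what changed: Instead of a ten-iteration loop with try/except around str.index substring scans, B partitions the domain at its first '.' once and does a single set lookup of the leading label.
import Mathlib
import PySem

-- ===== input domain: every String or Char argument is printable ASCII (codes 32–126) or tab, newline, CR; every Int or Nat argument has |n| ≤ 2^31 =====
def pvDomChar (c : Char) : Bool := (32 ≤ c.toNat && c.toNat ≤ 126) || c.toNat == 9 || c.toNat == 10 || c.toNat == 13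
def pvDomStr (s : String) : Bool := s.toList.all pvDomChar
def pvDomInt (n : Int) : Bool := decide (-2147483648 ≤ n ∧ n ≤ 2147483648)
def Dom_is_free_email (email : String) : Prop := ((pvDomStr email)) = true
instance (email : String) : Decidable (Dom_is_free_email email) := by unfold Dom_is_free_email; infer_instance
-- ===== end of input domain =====

-- B replaces A's ten-iteration loop (try/except around str.index substring scans of dotted
-- prefixes) by one partition of the domain at its first '.' and a set lookup of the leading label.

-- ===== PORT A =====
-- the for-loop with early 'return True'; company_domain.index(b)==0 is find==0
-- (the except: pass branch swallows ValueError, i.e. find = -1, which the == 0 test also rejects)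
def isFreeLoop (company_domain : String) : List String → Bool
  | [] => false
  | block_domain :: rest =>
      if PySem.Str.find company_domain block_domain == 0 then true
      else isFreeLoop company_domain rest

def is_free_email (email : String) : Bool :=
  let company_domain := PySem.Str.slice email (some (PySem.Str.find email "@" + 1)) none
  isFreeLoop company_domain
    ["qq.", "163.", "126.", "sina.", "hotmail.", "gmail.", "yahoo.", "sohu.", "outlook.", "foxmail."]

-- ===== PORT B =====
def pvFreeProviders : PySem.Set String :=
  PySem.Set.ofList ["qq", "163", "126", "sina", "hotmail", "gmail", "yahoo", "sohu", "outlook", "foxmail"]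

-- str.partition(sep) ported by hand (not in PySem): CPython splits at the FIRST occurrence of
-- sep, returning (s, '', '') when sep is absent — exact via Chars.find.
def charsPartition (s sep : List Char) : List Char × List Char × List Char :=
  let i := PySem.Chars.find s sep
  if i == -1 then (s, [], [])
  else (s.take i.toNat, sep, s.drop (i.toNat + sep.length))

def is_free_email_alt (email : String) : Bool :=
  let company_domain := PySem.Str.slice email (some (PySem.Str.find email "@" + 1)) none
  let p := charsPartition company_domain.toList ".".toList
  (p.2.1 == ['.']) && pvFreeProviders.contains (String.ofList p.1)

-- ===== PRECONDITION & SPEC =====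
-- Pre_ excludes emails without '@', on which A raises ValueError (email.index('@')).
def Pre_is_free_email (email : String) : Prop := PySem.Str.isIn "@" email = true
instance (email : String) : Decidable (Pre_is_free_email email) := by unfold Pre_is_free_email; infer_instance
def pvWitness_is_free_email : String := "alice@qq.com"
def Spec_is_free_email (email : String) (out : Bool) : Prop := out = is_free_email_alt email
instance (email : String) (out : Bool) : Decidable (Spec_is_free_email email out) := by unfold Spec_is_free_email; infer_instance

-- ===== CLAIM (what is proved, stated in full; the proofs are below) =====
def Claim_equal_is_free_email : Prop := ∀ (email : String), Dom_is_free_email email → Pre_is_free_email email → Spec_is_free_email email (is_free_email email)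

-- ===== LEMMAS AND PROOFS =====

-- a singleton list is a prefix iff it is the head
lemma singleton_prefix_iff (c : Char) (xs : List Char) :
    [c] <+: xs ↔ ∃ t, xs = c :: t := by
  constructor
  · rintro ⟨t, ht⟩; exact ⟨t, ht.symm⟩
  · rintro ⟨t, rfl⟩; exact ⟨t, rfl⟩

-- find = 0 iff the needle is a prefix
lemma find_eq_zero_iff (d sub : List Char) :
    PySem.Chars.find d sub = 0 ↔ sub <+: d := by
  constructor
  · intro h
    have h0 : 0 ≤ PySem.Chars.find d sub := by omega
    have := (PySem.Chars.find_spec (s := d) (sub := sub) h0).1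
    simpa [h] using this
  · intro hp
    have hinf : sub <:+: d := hp.isInfix
    have h0 : 0 ≤ PySem.Chars.find d sub := (PySem.Chars.find_nonneg_iff d sub).mpr hinf
    have hs := PySem.Chars.find_spec (s := d) (sub := sub) h0
    by_contra hne
    have hpos : 0 < (PySem.Chars.find d sub).toNat := by omega
    exact hs.2 0 hpos (by simpa using hp)

-- the first '.' of l ++ '.'::t is at position l.length when l is dot-free
lemma find_dot_eq (l t : List Char) (hl : '.' ∉ l) :
    PySem.Chars.find (l ++ '.' :: t) ['.'] = (l.length : Int) := by
  set d := l ++ '.' :: t with hd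
  have hpre : ['.'] <+: d.drop l.length := by
    simp [hd, List.prefix_iff_eq_take]
  have hinf : ['.'] <:+: d := by
    rcases hpre with ⟨s, hs⟩
    exact ⟨d.take l.length, s, by rw [List.append_assoc, hs, List.take_append_drop]⟩
  have h0 : 0 ≤ PySem.Chars.find d ['.'] := (PySem.Chars.find_nonneg_iff d ['.']).mpr hinf
  have hs := PySem.Chars.find_spec (s := d) (sub := ['.']) h0
  set k := (PySem.Chars.find d ['.']).toNat with hk
  have hkle : k ≤ l.length := by
    by_contra hgt
    exact hs.2 l.length (by omega) hpre
  have hknotlt : ¬ k < l.length := by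
    intro hlt
    have := hs.1
    rw [singleton_prefix_iff] at this
    rcases this with ⟨s, hsz⟩
    have hdk : d[k]? = some '.' := by
      have : (d.drop k)[0]? = some '.' := by rw [hsz]; rfl
      simpa [List.getElem?_drop] using this
    have hlk : d[k]? = l[k]? := by
      rw [hd]; exact List.getElem?_append_left hlt
    have : l[k]? = some '.' := by rw [← hlk]; exact hdk
    exact hl (List.mem_of_getElem? this)
  have hkeq : k = l.length := by omega
  omega

-- the per-label equivalence, at the character-list level
lemma label_iff (d l : List Char) (hl : '.' ∉ l) :
    PySem.Chars.find d (l ++ ['.']) = 0 ↔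
      (PySem.Chars.find d ['.'] ≠ -1 ∧ d.take (PySem.Chars.find d ['.']).toNat = l) := by
  constructor
  · intro h
    rcases (find_eq_zero_iff d (l ++ ['.'])).mp h with ⟨t, ht⟩
    have hd : d = l ++ '.' :: t := by rw [← ht]; simp
    subst hd
    have hf := find_dot_eq l t hl
    refine ⟨by rw [hf]; omega, ?_⟩
    rw [hf]
    simp
  · rintro ⟨hne, hsl⟩
    have h0 : 0 ≤ PySem.Chars.find d ['.'] := by
      have := PySem.Chars.neg_one_le_find (s := d) (sub := ['.'])
      omega
    have hs := PySem.Chars.find_spec (s := d) (sub := ['.']) h0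
    rcases (singleton_prefix_iff '.' _).mp hs.1 with ⟨t, ht⟩
    have hd : d = l ++ '.' :: t := by
      conv_lhs => rw [← List.take_append_drop (PySem.Chars.find d ['.']).toNat d]
      rw [hsl, ht]
    rw [find_eq_zero_iff]
    exact ⟨t, by rw [hd]; simp⟩

-- the same equivalence at the String level, Bool-valued, against B's partition
lemma label_iff_str (s lab : String) (hl : '.' ∉ lab.toList) :
    (PySem.Str.find s (lab ++ ".") == 0) =
      (((charsPartition s.toList ".".toList).2.1 == ['.']) &&
        (String.ofList (charsPartition s.toList ".".toList).1 == lab)) := by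
  rw [Bool.eq_iff_iff]
  have hdot : (("." : String).toList) = ['.'] := rfl
  simp only [charsPartition, hdot, beq_iff_eq, Bool.and_eq_true, PySem.Str.find_eq,
    String.toList_append, hdot]
  split_ifs with h
  · simp only [beq_iff_eq] at h
    constructor
    · intro hz
      exact absurd ((label_iff s.toList lab.toList hl).mp hz).1 (by simpa using h)
    · rintro ⟨hfalse, -⟩; simp at hfalse
  · simp only [beq_iff_eq] at h
    rw [label_iff s.toList lab.toList hl]
    constructor
    · rintro ⟨-, htk⟩
      exact ⟨rfl, by simp [← String.toList_inj] at htk ⊢; exact htk⟩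
    · rintro ⟨-, hmk⟩
      simp [← String.toList_inj] at hmk
      exact ⟨by simpa using h, by simpa using hmk⟩

-- ===== VERDICT (by name: the statement is the Claim_ definition above) =====
theorem is_free_email_spec : Claim_equal_is_free_email := by
  intro email _ _
  unfold Spec_is_free_email is_free_email is_free_email_alt
  set s := PySem.Str.slice email (some (PySem.Str.find email "@" + 1)) none with hs
  simp only [isFreeLoop, pvFreeProviders, PySem.Set.ofList, PySem.Set.contains,
    List.contains_cons, List.contains_nil, Bool.if_true_left]
  rw [show ("qq." : String) = "qq" ++ "." from rfl,
      show ("163." : String) = "163" ++ "." from rfl,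
      show ("126." : String) = "126" ++ "." from rfl,
      show ("sina." : String) = "sina" ++ "." from rfl,
      show ("hotmail." : String) = "hotmail" ++ "." from rfl,
      show ("gmail." : String) = "gmail" ++ "." from rfl,
      show ("yahoo." : String) = "yahoo" ++ "." from rfl,
      show ("sohu." : String) = "sohu" ++ "." from rfl,
      show ("outlook." : String) = "outlook" ++ "." from rfl,
      show ("foxmail." : String) = "foxmail" ++ "." from rfl,
      label_iff_str s "qq" (by decide), label_iff_str s "163" (by decide),
      label_iff_str s "126" (by decide), label_iff_str s "sina" (by decide),
      label_iff_str s "hotmail" (by decide), label_iff_str s "gmail" (by decide),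
      label_iff_str s "yahoo" (by decide), label_iff_str s "sohu" (by decide),
      label_iff_str s "outlook" (by decide), label_iff_str s "foxmail" (by decide)]
  cases h : ((charsPartition s.toList ".".toList).2.1 == ['.']) <;> simp
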